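-- pv_equiv track=rewrite | github.com/sealablab/DPD-001 | tests/shared/async_adapter.py | _decode_state_from_digital
-- ===== SOURCE A (Python) =====
-- HVS_DIGITAL_INITIALIZING = 0
--
-- HVS_DIGITAL_IDLE = 3277
--
-- HVS_DIGITAL_ARMED = 6554
--
-- HVS_DIGITAL_FIRING = 9831
--
-- HVS_DIGITAL_COOLDOWN = 13108
--
-- def _decode_state_from_digital(digital: int, tolerance: int = 200) -> str:
--     """Decode FSM state from digital value."""
--     if digital < -tolerance:
--         return "FAULT"
--
--     state_map = [
--         (HVS_DIGITAL_INITIALIZING, "INITIALIZING"),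
--         (HVS_DIGITAL_IDLE, "IDLE"),
--         (HVS_DIGITAL_ARMED, "ARMED"),
--         (HVS_DIGITAL_FIRING, "FIRING"),
--         (HVS_DIGITAL_COOLDOWN, "COOLDOWN"),
--     ]
--
--     for expected, name in state_map:
--         if abs(digital - expected) <= tolerance:
--             return name
--
--     return "UNKNOWN"
-- ===== SOURCE B (Python) =====
-- _STATE_NAMES = ["INITIALIZING", "IDLE", "ARMED", "FIRING", "COOLDOWN"]
--
-- def _decode_state_from_digital(digital: int, tolerance: int = 200) -> str:
--     """Decode FSM state from digital value (arithmetic, no table scan)."""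
--     if digital < -tolerance:
--         return "FAULT"
--     # lowest candidate index: smallest i >= 0 with 3277*i >= digital - tolerance
--     i = max(0, -(-(digital - tolerance) // 3277))
--     if i <= 4 and abs(digital - 3277 * i) <= tolerance:
--         return _STATE_NAMES[i]
--     return "UNKNOWN"
-- ===== Notes on version B (the rewrite author's own statement) =====
-- stated objective: alternative
-- what changed: B computes the lowest candidate state index arithmetically by ceiling division of (digital - tolerance) by the 3277 step and checks that single candidate, instead of A's linear first-match scan over the state table.
import Mathlib
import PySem

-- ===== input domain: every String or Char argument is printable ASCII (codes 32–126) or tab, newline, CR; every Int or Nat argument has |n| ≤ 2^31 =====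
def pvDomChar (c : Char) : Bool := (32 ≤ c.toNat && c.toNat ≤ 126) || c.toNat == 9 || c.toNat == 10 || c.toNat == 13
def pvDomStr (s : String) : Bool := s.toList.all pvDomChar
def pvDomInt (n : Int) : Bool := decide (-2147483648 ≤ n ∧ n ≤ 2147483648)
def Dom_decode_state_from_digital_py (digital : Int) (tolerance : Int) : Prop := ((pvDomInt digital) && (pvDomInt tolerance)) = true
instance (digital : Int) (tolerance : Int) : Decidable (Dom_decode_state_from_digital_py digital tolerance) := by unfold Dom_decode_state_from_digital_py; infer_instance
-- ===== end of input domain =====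

-- B replaces A's linear scan of the state table by an arithmetic computation of the
-- lowest matching index (ceiling division by the 3277 step); objective: alternative.

-- ===== PORT A =====
-- the for-loop over state_map, first match wins
def pvScanA (digital : Int) (tolerance : Int) : List (Int × String) → String
  | [] => "UNKNOWN"
  | (expected, name) :: rest =>
      if |digital - expected| ≤ tolerance then name
      else pvScanA digital tolerance rest

def decode_state_from_digital_py (digital : Int) (tolerance : Int) : String :=
  if digital < -tolerance then "FAULT"
  else
    pvScanA digital tolerance
      [(0, "INITIALIZING"), (3277, "IDLE"), (6554, "ARMED"), (9831, "FIRING"), (13108, "COOLDOWN")]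

-- ===== PORT B =====
-- i = max(0, -(-(digital - tolerance) // 3277))
def pvIdxB (digital : Int) (tolerance : Int) : Int :=
  max 0 (-(PySem.Int.floordiv (-(digital - tolerance)) 3277))

def decode_state_from_digital_py_alt (digital : Int) (tolerance : Int) : String :=
  if digital < -tolerance then "FAULT"
  else
    if pvIdxB digital tolerance ≤ 4 ∧ |digital - 3277 * pvIdxB digital tolerance| ≤ tolerance then
      -- index proved in range by the guard, so the getD default is never used
      (PySem.List.pyGet? ["INITIALIZING", "IDLE", "ARMED", "FIRING", "COOLDOWN"]
        (pvIdxB digital tolerance)).getD "UNKNOWN"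
    else "UNKNOWN"

-- ===== PRECONDITION & SPEC =====
def Spec_decode_state_from_digital_py (digital : Int) (tolerance : Int) (out : String) : Prop := out = decode_state_from_digital_py_alt digital tolerance
instance (digital : Int) (tolerance : Int) (out : String) : Decidable (Spec_decode_state_from_digital_py digital tolerance out) := by unfold Spec_decode_state_from_digital_py; infer_instance

-- ===== CLAIM (what is proved, stated in full; the proofs are below) =====
def Claim_equal_decode_state_from_digital_py : Prop := ∀ (digital : Int) (tolerance : Int), Dom_decode_state_from_digital_py digital tolerance → Spec_decode_state_from_digital_py digital tolerance (decode_state_from_digital_py digital tolerance)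

-- ===== LEMMAS AND PROOFS =====

-- ===== VERDICT (by name: the statement is the Claim_ definition above) =====
theorem decode_state_from_digital_py_spec : Claim_equal_decode_state_from_digital_py := by
  intro d t _
  unfold Spec_decode_state_from_digital_py decode_state_from_digital_py decode_state_from_digital_py_alt
  by_cases hf : d < -t
  · simp [hf]
  · rw [if_neg hf, if_neg hf]
    obtain ⟨q, hq1, hq2, hqi⟩ :
        ∃ q : Int, (q - 1) * 3277 < d - t ∧ d - t ≤ q * 3277 ∧ pvIdxB d t = max 0 q := by
      refine ⟨-(PySem.Int.floordiv (-(d - t)) 3277), ?_, ?_, rfl⟩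
      · exact ((PySem.Int.neg_floordiv_neg_eq_iff_of_pos (by norm_num)).mp rfl).1
      · exact ((PySem.Int.neg_floordiv_neg_eq_iff_of_pos (by norm_num)).mp rfl).2
    have hi : (q ≤ 0 ∧ pvIdxB d t = 0) ∨ (0 ≤ q ∧ pvIdxB d t = q) := by
      rcases le_total q 0 with h | h
      · exact Or.inl ⟨h, by rw [hqi, max_eq_left h]⟩
      · exact Or.inr ⟨h, by rw [hqi, max_eq_right h]⟩
    simp only [pvScanA]
    simp only [abs_le]
    split_ifs
    · have hk : pvIdxB d t = 0 := by rcases hi with ⟨_, h⟩ | ⟨_, h⟩ <;> omega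
      rw [hk]; rfl
    · exfalso; rcases hi with ⟨_, h⟩ | ⟨_, h⟩ <;> omega
    · have hk : pvIdxB d t = 1 := by rcases hi with ⟨_, h⟩ | ⟨_, h⟩ <;> omega
      rw [hk]; rfl
    · exfalso; rcases hi with ⟨_, h⟩ | ⟨_, h⟩ <;> omega
    · have hk : pvIdxB d t = 2 := by rcases hi with ⟨_, h⟩ | ⟨_, h⟩ <;> omega
      rw [hk]; rfl
    · exfalso; rcases hi with ⟨_, h⟩ | ⟨_, h⟩ <;> omega
    · have hk : pvIdxB d t = 3 := by rcases hi with ⟨_, h⟩ | ⟨_, h⟩ <;> omega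
      rw [hk]; rfl
    · exfalso; rcases hi with ⟨_, h⟩ | ⟨_, h⟩ <;> omega
    · have hk : pvIdxB d t = 4 := by rcases hi with ⟨_, h⟩ | ⟨_, h⟩ <;> omega
      rw [hk]; rfl
    · exfalso; rcases hi with ⟨_, h⟩ | ⟨_, h⟩ <;> omega
    · exfalso; rcases hi with ⟨_, h⟩ | ⟨_, h⟩ <;> omega
    · rfl
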